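-- pv_equiv track=rewrite | github.com/cambridgeltl/multi3woz | code/nlg/my_dataset.py | _linearise_act
-- ===== SOURCE A (Python) =====
-- def _linearise_act(dial_act):
--
-- 	da_string_list = []
-- 	first_inten = True
-- 	for domain_intent_pair, slot_val_list in dial_act.items():
--
-- 		if not first_inten:
-- 			da_string_list.append(";")
-- 		first_inten = False
--
-- 		domain, intent = domain_intent_pair.split("-")
-- 		domain, intent = domain.lower(), intent.lower()
--
-- 		da_string_list.append("["+domain+"]")
-- 		da_string_list.append("["+intent+"]")
-- 		da_string_list.append("(")
--
-- 		is_first = True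
-- 		for slot_val in slot_val_list:
-- 			slot, val = slot_val
-- 			slot, val = slot.lower(), val.lower()
-- 			if not is_first:
-- 				da_string_list.append(",")
-- 			is_first = False
-- 			da_string_list.append("["+slot+"]")
-- 			da_string_list.append("["+val+"]")
-- 		da_string_list.append(")")
-- 	da_string =  "".join(da_string_list)
-- 	return da_string
-- ===== SOURCE B (Python) =====
-- def _linearise_act(dial_act):
--     # Recursive decomposition: structural recursion on the list of groups and
--     # on each slot/value list, building the string back-to-front; no token
--     # list, no first-element flags, no join.
--     return _rec_groups(list(dial_act.items()))
--
--
-- def _rec_groups(items):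
--     if not items:
--         return ""
--     key, slot_val_list = items[0]
--     domain, intent = key.split("-")
--     head = "[" + domain.lower() + "][" + intent.lower() + "](" + _rec_slots(slot_val_list) + ")"
--     if len(items) == 1:
--         return head
--     return head + ";" + _rec_groups(items[1:])
--
--
-- def _rec_slots(svl):
--     if not svl:
--         return ""
--     slot, val = svl[0]
--     item = "[" + slot.lower() + "][" + val.lower() + "]"
--     if len(svl) == 1:
--         return item
--     return item + "," + _rec_slots(svl[1:])
-- ===== Notes on version B (the rewrite author's own statement) =====
-- stated objective: alternative
-- what changed: Replaces A's single imperative pass that accumulates a flat token list with two first-element boolean flags and manual ';'/',' separator appends by structural recursion: one recursive function over the group list and one over each slot/value list, each building its string from the tail back with the separator decided by whether a tail remains.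
import Mathlib
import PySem

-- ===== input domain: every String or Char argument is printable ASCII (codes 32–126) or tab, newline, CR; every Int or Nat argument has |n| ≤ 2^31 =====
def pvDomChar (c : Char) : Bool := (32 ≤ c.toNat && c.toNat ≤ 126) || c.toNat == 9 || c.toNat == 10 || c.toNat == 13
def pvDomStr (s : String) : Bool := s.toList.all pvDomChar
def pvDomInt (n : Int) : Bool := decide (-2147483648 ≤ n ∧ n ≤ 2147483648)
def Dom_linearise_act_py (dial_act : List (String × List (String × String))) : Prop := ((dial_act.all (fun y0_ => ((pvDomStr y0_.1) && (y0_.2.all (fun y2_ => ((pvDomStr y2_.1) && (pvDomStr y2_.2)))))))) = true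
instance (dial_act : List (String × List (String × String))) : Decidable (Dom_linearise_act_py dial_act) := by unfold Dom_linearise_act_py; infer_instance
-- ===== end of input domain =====

-- B replaces A's single imperative pass (flat token list, two first-element flags, manual
-- ';'/',' appends) by structural recursion over the group list and over each slot/value
-- list, building the string back from the tail; same output, same cost ("alternative").
-- Strings are modelled as their code-point lists (PySem.Chars) and rebuilt with String.ofList.

-- ===== PORT A =====
-- inner loop body: appends "," (unless first), then "["+slot+"]" and "["+val+"]"
def pvAInner (st : List (List Char) × Bool) (sv : String × String) : List (List Char) × Bool :=
  let lst := if !st.2 then st.1 ++ [[',']] else st.1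
  (lst ++ [['['] ++ PySem.Chars.lower sv.1.toList ++ [']'],
           ['['] ++ PySem.Chars.lower sv.2.toList ++ [']']], false)

-- outer loop body: appends ";" (unless first), "["+domain+"]", "["+intent+"]", "(", inner loop, ")"
def pvAOuter (st : List (List Char) × Bool) (p : String × List (String × String)) :
    List (List Char) × Bool :=
  let lst := if !st.2 then st.1 ++ [[';']] else st.1
  let parts := PySem.Chars.splitOn p.1.toList ['-']
  let domain := PySem.Chars.lower (parts.getD 0 [])   -- under Pre_ split gives exactly 2 parts
  let intent := PySem.Chars.lower (parts.getD 1 [])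
  let lst := lst ++ [['['] ++ domain ++ [']'], ['['] ++ intent ++ [']'], ['(']]
  let lst := (p.2.foldl pvAInner (lst, true)).1
  (lst ++ [[')']], false)

def linearise_act_py (dial_act : List (String × List (String × String))) : String :=
  String.ofList (PySem.Chars.join [] (dial_act.foldl pvAOuter ([], true)).1)

-- ===== PORT B =====
-- "[" + slot.lower() + "][" + val.lower() + "]"
def pvBItem (sv : String × String) : List Char :=
  ['['] ++ PySem.Chars.lower sv.1.toList ++ [']', '['] ++ PySem.Chars.lower sv.2.toList ++ [']']

-- _rec_slots: structural recursion on the slot/value list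
def pvBSlots : List (String × String) → List Char
  | [] => []
  | [sv] => pvBItem sv
  | sv :: rest => pvBItem sv ++ [','] ++ pvBSlots rest

-- head group string "["+domain+"]["+intent+"]("+slots+")"
def pvBHead (p : String × List (String × String)) : List Char :=
  let parts := PySem.Chars.splitOn p.1.toList ['-']
  ['['] ++ PySem.Chars.lower (parts.getD 0 []) ++ [']', '[']
        ++ PySem.Chars.lower (parts.getD 1 []) ++ [']', '(']
        ++ pvBSlots p.2 ++ [')']

-- _rec_groups: structural recursion on the group list
def pvBGroups : List (String × List (String × String)) → List Char
  | [] => []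
  | [p] => pvBHead p
  | p :: rest => pvBHead p ++ [';'] ++ pvBGroups rest

def linearise_act_py_alt (dial_act : List (String × List (String × String))) : String :=
  String.ofList (pvBGroups dial_act)

-- ===== PRECONDITION & SPEC =====
-- Pre_ excludes exactly the inputs where Python raises ValueError: a key whose split("-")
-- does not unpack into two parts (i.e. the key does not contain exactly one '-').
def Pre_linearise_act_py (dial_act : List (String × List (String × String))) : Prop :=
  ∀ p ∈ dial_act, PySem.Str.count p.1 "-" = 1
instance (dial_act : List (String × List (String × String))) : Decidable (Pre_linearise_act_py dial_act) := by unfold Pre_linearise_act_py; infer_instance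

def pvWitness_linearise_act_py : (List (String × List (String × String))) :=
  [("Hotel-Inform", [("Area", "east"), ("Price", "cheap")]), ("Train-Request", [])]

def Spec_linearise_act_py (dial_act : List (String × List (String × String))) (out : String) : Prop := out = linearise_act_py_alt dial_act
instance (dial_act : List (String × List (String × String))) (out : String) : Decidable (Spec_linearise_act_py dial_act out) := by unfold Spec_linearise_act_py; infer_instance

-- ===== CLAIM (what is proved, stated in full; the proofs are below) =====
def Claim_equal_linearise_act_py : Prop := ∀ (dial_act : List (String × List (String × String))), Dom_linearise_act_py dial_act → Pre_linearise_act_py dial_act → Spec_linearise_act_py dial_act (linearise_act_py dial_act)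

-- ===== LEMMAS AND PROOFS =====

-- "".join is flatten
theorem pv_join_nil_flatten (l : List (List Char)) :
    PySem.Chars.join [] l = l.flatten := by
  induction l with
  | nil => rfl
  | cons x xs ih =>
    cases xs with
    | nil => simp [PySem.Chars.join_singleton]
    | cons y ys =>
      rw [PySem.Chars.join_cons_cons] at *
      simp_all

-- both loop bodies always leave the flag false
theorem pvAInner_eta (st : List (List Char) × Bool) (sv : String × String) :
    pvAInner st sv = ((pvAInner st sv).1, false) := rfl

theorem pvAOuter_eta (st : List (List Char) × Bool) (p : String × List (String × String)) :
    pvAOuter st p = ((pvAOuter st p).1, false) := rfl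

-- the ","-prefixed tail items flatten to "," ++ the recursive slot string (when nonempty)
theorem pv_slots_sep (l : List (String × String)) :
    (l.map (fun sv => [','] ++ pvBItem sv)).flatten
      = if l.isEmpty then [] else [','] ++ pvBSlots l := by
  induction l with
  | nil => simp
  | cons x xs ih =>
    cases xs with
    | nil => simp [pvBSlots]
    | cons y ys => simp_all [pvBSlots]

-- inner loop, flag already false: every pair contributes "," ++ its item
theorem pv_inner_false (svs : List (String × String)) (lst : List (List Char)) :
    ((svs.foldl pvAInner (lst, false)).1).flatten
      = lst.flatten ++ (svs.map (fun sv => [','] ++ pvBItem sv)).flatten := by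
  induction svs generalizing lst with
  | nil => simp
  | cons sv rest ih =>
    rw [List.foldl_cons, pvAInner_eta, ih]
    simp [pvAInner, pvBItem]

-- inner loop from the initial (first = true) state: B's recursive slot string
theorem pv_inner_true (svs : List (String × String)) (lst : List (List Char)) :
    ((svs.foldl pvAInner (lst, true)).1).flatten
      = lst.flatten ++ pvBSlots svs := by
  cases svs with
  | nil => simp [pvBSlots]
  | cons sv rest =>
    rw [List.foldl_cons, pvAInner_eta, pv_inner_false, pv_slots_sep]
    cases rest <;> simp [pvAInner, pvBItem, pvBSlots]

-- one outer step appends exactly the head group string (plus ";" when not first)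
theorem pv_outer_step (st : List (List Char) × Bool) (p : String × List (String × String)) :
    ((pvAOuter st p).1).flatten
      = st.1.flatten ++ (if !st.2 then [';'] else []) ++ pvBHead p := by
  obtain ⟨lst, b⟩ := st
  show ((p.2.foldl pvAInner (_, true)).1 ++ [[')']]).flatten = _
  rw [List.flatten_append, pv_inner_true]
  cases b <;> simp [pvBHead]

-- the ";"-prefixed tail groups flatten to ";" ++ the recursive group string (when nonempty)
theorem pv_groups_sep (l : List (String × List (String × String))) :
    (l.map (fun p => [';'] ++ pvBHead p)).flatten
      = if l.isEmpty then [] else [';'] ++ pvBGroups l := by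
  induction l with
  | nil => simp
  | cons x xs ih =>
    cases xs with
    | nil => simp [pvBGroups]
    | cons y ys => simp_all [pvBGroups]

-- outer loop, flag already false: every group contributes ";" ++ its string
theorem pv_outer_false (da : List (String × List (String × String))) (lst : List (List Char)) :
    ((da.foldl pvAOuter (lst, false)).1).flatten
      = lst.flatten ++ (da.map (fun p => [';'] ++ pvBHead p)).flatten := by
  induction da generalizing lst with
  | nil => simp
  | cons p rest ih =>
    rw [List.foldl_cons, pvAOuter_eta, ih, pv_outer_step]
    simp

-- whole outer loop from the initial state: B's recursive group string
theorem pv_outer_true (da : List (String × List (String × String))) :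
    ((da.foldl pvAOuter ([], true)).1).flatten = pvBGroups da := by
  cases da with
  | nil => simp [pvBGroups]
  | cons p rest =>
    rw [List.foldl_cons, pvAOuter_eta, pv_outer_false, pv_outer_step, pv_groups_sep]
    cases rest <;> simp [pvBGroups]

-- ===== VERDICT (by name: the statement is the Claim_ definition above) =====
theorem linearise_act_py_spec : Claim_equal_linearise_act_py := by
  intro da _ _
  unfold Spec_linearise_act_py linearise_act_py linearise_act_py_alt
  rw [pv_join_nil_flatten, pv_outer_true]
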